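-- pv_equiv track=rewrite | github.com/Andrevile/Algorithm | Programmers/더 맵게.py | solution
-- ===== SOURCE A (Python) =====
-- import heapq
--
-- def solution(scoville, K):
--     answer = 0
--     heapq.heapify(scoville)
--     count = 0
--
--     while len(scoville) >= 2 and scoville[0] < K:
--         count += 1
--         lower_spicy = heapq.heappop(scoville)
--         higer_spicy = heapq.heappop(scoville)
--         new_food = new_scoville(higer_spicy, lower_spicy)
--         heapq.heappush(scoville, new_food)
--     if len(scoville) <= 1 and scoville[0] < K:
--         return -1
--     else:
--         return count
--
-- def new_scoville(higer_spicy, lower_spicy):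
--     return higer_spicy * 2 + lower_spicy
-- ===== SOURCE B (Python) =====
-- def solution(scoville, K):
--     # Equivalence is about the return value only: A heapifies scoville in place, B leaves it untouched.
--     foods = list(scoville)
--     count = 0
--     while len(foods) >= 2 and min(foods) < K:
--         lower = min(foods)
--         foods.remove(lower)
--         higher = min(foods)
--         foods.remove(higher)
--         foods.append(higher * 2 + lower)
--         count += 1
--     if len(foods) <= 1 and foods[0] < K:
--         return -1
--     return count
-- ===== Notes on version B (the rewrite author's own statement) =====
-- stated objective: simpler
-- what changed: Replaces the binary heap (heapify/heappop/heappush) by a plain list processed with repeated min() scans and remove(), appending each merged food; the final length/first-element check is kept. Pre_ excludes the empty list, on which both A and B raise IndexError. Return value only: A heapifies the argument in place, B does not mutate it.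
import Mathlib
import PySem

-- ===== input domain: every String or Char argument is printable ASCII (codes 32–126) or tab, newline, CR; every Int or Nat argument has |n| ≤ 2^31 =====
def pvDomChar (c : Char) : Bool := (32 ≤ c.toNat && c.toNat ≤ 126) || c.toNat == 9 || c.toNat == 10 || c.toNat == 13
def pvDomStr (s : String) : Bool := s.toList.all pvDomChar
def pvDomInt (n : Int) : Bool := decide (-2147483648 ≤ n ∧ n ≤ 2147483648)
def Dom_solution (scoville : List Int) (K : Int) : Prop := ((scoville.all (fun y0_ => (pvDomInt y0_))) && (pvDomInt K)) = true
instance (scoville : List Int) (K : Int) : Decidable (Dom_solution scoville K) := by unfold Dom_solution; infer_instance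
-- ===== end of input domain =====

-- B replaces A's binary heap by a plain list with repeated min scans (simpler, no heap machinery);
-- equivalence is about the return value only: A heapifies its argument in place, B does not mutate it.

-- ===== PORT A =====
-- A uses Python's heapq; ported by hand, step for step, from CPython's heapq.py
-- (heapify / heappush / heappop with _siftdown / _siftup); exact for Int elements.

def pvGet (a : List Int) (i : Nat) : Int := a.getD i 0

-- compact termination facts, cited by name so the recursive definitions stay small
lemma pv_parent_dec (s pos : Nat) (h : s < pos) : (pos - 1) / 2 < pos :=
  Nat.lt_of_le_of_lt (Nat.div_le_self _ 2) (Nat.sub_lt (Nat.lt_of_le_of_lt (Nat.zero_le _) h) Nat.one_pos)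

lemma pv_child_dec (len pos : Nat) (cond : Prop) [Decidable cond] (h : 2*pos+1 < len) :
    len - (if cond then 2*pos+2 else 2*pos+1) < len - pos := by
  split_ifs <;> omega

-- CPython heapq._siftdown(heap, startpos, pos), with newitem = heap[pos] read up front
def siftdownAux (a : List Int) (s pos : Nat) (x : Int) : List Int :=
  if _h : s < pos then
    let parentpos := (pos - 1) / 2
    let parent := pvGet a parentpos
    if x < parent then
      siftdownAux (a.set pos parent) s parentpos x
    else
      a.set pos x
  else
    a.set pos x
  termination_by pos
  decreasing_by exact pv_parent_dec _ _ _h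

def siftdown (a : List Int) (s pos : Nat) : List Int :=
  siftdownAux a s pos (pvGet a pos)

-- the while-loop of CPython heapq._siftup: move the smaller child up until a leaf is reached
def siftupLoop (a : List Int) (pos : Nat) : List Int × Nat :=
  if h : 2*pos+1 < a.length then
    -- childpos = 2*pos+1, rightpos = childpos+1; pick the right child iff it exists and not heap[childpos] < heap[rightpos]
    let cp := if 2*pos+2 < a.length ∧ ¬ pvGet a (2*pos+1) < pvGet a (2*pos+2) then 2*pos+2 else 2*pos+1
    siftupLoop (a.set pos (pvGet a cp)) cp
  else (a, pos)
  termination_by a.length - pos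
  decreasing_by rw [List.length_set]; exact pv_child_dec a.length pos _ h

-- CPython heapq._siftup(heap, pos)
def siftup (a : List Int) (pos : Nat) : List Int :=
  let newitem := pvGet a pos
  let r := siftupLoop a pos
  siftdownAux r.1 pos r.2 newitem

-- heapq.heapify: for i in reversed(range(n//2)): _siftup(x, i)
def pyHeapify (a : List Int) : List Int :=
  ((List.range (a.length / 2)).reverse).foldl (fun h i => siftup h i) a

-- heapq.heappush: append, then _siftdown(heap, 0, len(heap)-1)
def pyHeappush (a : List Int) (item : Int) : List Int :=
  siftdown (a ++ [item]) 0 ((a ++ [item]).length - 1)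

-- heapq.heappop; Python raises IndexError on [] — in `solution` it is only called with len ≥ 2
def pyHeappop (a : List Int) : Int × List Int :=
  if a.dropLast.isEmpty then (a.getLastD 0, a.dropLast)
  else (pvGet a.dropLast 0, siftup (a.dropLast.set 0 (a.getLastD 0)) 0)

def new_scoville (higer_spicy lower_spicy : Int) : Int :=
  higer_spicy * 2 + lower_spicy

-- length facts cited by solLoop's termination proof
lemma length_siftdownAux (a : List Int) (s pos : Nat) (x : Int) :
    (siftdownAux a s pos x).length = a.length := by
  fun_induction siftdownAux a s pos x <;> simp_all [List.length_set]

lemma length_siftupLoop (a : List Int) (pos : Nat) :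
    (siftupLoop a pos).1.length = a.length := by
  fun_induction siftupLoop a pos <;> simp_all [List.length_set]

lemma length_siftup (a : List Int) (pos : Nat) :
    (siftup a pos).length = a.length := by
  simp [siftup, length_siftdownAux, length_siftupLoop]

lemma length_pyHeappop (a : List Int) :
    (pyHeappop a).2.length = a.length - 1 := by
  have hl : a.dropLast.length = a.length - 1 := List.length_dropLast
  unfold pyHeappop
  split_ifs with h
  · simp only [List.isEmpty_iff] at h; rw [h] at hl; simp [h, hl.symm]
  · simp [length_siftup, hl]


lemma length_pyHeappush (a : List Int) (x : Int) :
    (pyHeappush a x).length = a.length + 1 := by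
  simp [pyHeappush, siftdown, length_siftdownAux]

lemma pv_sol_dec (heap : List Int) (v : Int) (h2 : 2 ≤ heap.length) :
    (pyHeappush (pyHeappop (pyHeappop heap).2).2 v).length < heap.length := by
  rw [length_pyHeappush, length_pyHeappop, length_pyHeappop]; omega

-- the while-loop of A's solution, followed by its final if/return
def solLoop (heap : List Int) (K : Int) (count : Int) : Int :=
  if h : 2 ≤ heap.length ∧ pvGet heap 0 < K then
    let p1 := pyHeappop heap
    let p2 := pyHeappop p1.2
    solLoop (pyHeappush p2.2 (new_scoville p2.1 p1.1)) K (count + 1)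
  else if heap.length ≤ 1 ∧ pvGet heap 0 < K then -1 else count
  termination_by heap.length
  decreasing_by exact pv_sol_dec heap _ h.1

def solution (scoville : List Int) (K : Int) : Int :=
  solLoop (pyHeapify scoville) K 0

-- ===== PORT B =====

-- cited by altLoop's termination proof: removing min(foods) shortens foods by one
lemma length_remove_min (foods : List Int) (h : foods ≠ []) :
    ((PySem.List.remove? foods ((PySem.List.min? foods (fun x => x)).getD 0)).getD foods).length + 1
      = foods.length := by
  obtain ⟨m, hm⟩ : ∃ m, PySem.List.min? foods (fun x => x) = some m := by
    cases hmn : PySem.List.min? foods (fun x => x) with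
    | none => exact absurd ((PySem.List.min?_eq_none_iff foods _).mp hmn) h
    | some m => exact ⟨m, rfl⟩
  have hmem : m ∈ foods := PySem.List.min?_mem hm
  rw [hm, Option.getD_some, PySem.List.remove?_eq_some_erase foods m hmem, Option.getD_some,
    List.length_erase_of_mem hmem]
  have : 1 ≤ foods.length := List.length_pos_of_ne_nil h
  omega

lemma pv_alt_dec (foods : List Int) (x : Int) (h2 : 2 ≤ foods.length) :
    (((PySem.List.remove?
          ((PySem.List.remove? foods ((PySem.List.min? foods (fun x => x)).getD 0)).getD foods)
          ((PySem.List.min?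
              ((PySem.List.remove? foods ((PySem.List.min? foods (fun x => x)).getD 0)).getD foods)
              (fun x => x)).getD 0)).getD
        ((PySem.List.remove? foods ((PySem.List.min? foods (fun x => x)).getD 0)).getD foods))
      ++ [x]).length < foods.length := by
  have h1 := length_remove_min foods (by intro he; rw [he] at h2; simp at h2)
  have h2' := length_remove_min
    ((PySem.List.remove? foods ((PySem.List.min? foods (fun x => x)).getD 0)).getD foods)
    (by intro he; rw [he] at h1; simp only [List.length_nil] at h1; omega)
  simp only [List.length_append, List.length_cons, List.length_nil]
  omega

def altLoop (foods : List Int) (K : Int) (count : Int) : Int :=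
  if h : 2 ≤ foods.length ∧ (PySem.List.min? foods (fun x => x)).getD 0 < K then
    let lower := (PySem.List.min? foods (fun x => x)).getD 0
    let f1 := (PySem.List.remove? foods lower).getD foods
    let higher := (PySem.List.min? f1 (fun x => x)).getD 0
    let f2 := (PySem.List.remove? f1 higher).getD f1
    altLoop (f2 ++ [higher * 2 + lower]) K (count + 1)
  else if foods.length ≤ 1 ∧ foods.getD 0 0 < K then -1 else count
  termination_by foods.length
  decreasing_by exact pv_alt_dec foods _ h.1

def solution_alt (scoville : List Int) (K : Int) : Int :=
  altLoop scoville K 0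

-- ===== PRECONDITION & SPEC =====
-- Pre_ excludes only the empty list, on which Python's A raises IndexError at `scoville[0]` (B raises there too).
def Pre_solution (scoville : List Int) (K : Int) : Prop := scoville ≠ []
instance (scoville : List Int) (K : Int) : Decidable (Pre_solution scoville K) := by
  unfold Pre_solution; infer_instance

def pvWitness_solution : List Int × Int := ([1, 2, 3, 9, 10, 12], 7)

def Spec_solution (scoville : List Int) (K : Int) (out : Int) : Prop := out = solution_alt scoville K
instance (scoville : List Int) (K : Int) (out : Int) : Decidable (Spec_solution scoville K out) := by
  unfold Spec_solution; infer_instance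

-- ===== CLAIM (what is proved, stated in full; the proofs are below) =====
def Claim_equal_solution : Prop := ∀ (scoville : List Int) (K : Int), Dom_solution scoville K → Pre_solution scoville K → Spec_solution scoville K (solution scoville K)

-- ===== LEMMAS AND PROOFS =====

-- `Anc s pos`: s lies on the ancestor chain of pos in the implicit binary heap
def Anc (s pos : Nat) : Prop :=
  if _h : s < pos then Anc s ((pos - 1) / 2) else pos = s
  termination_by pos
  decreasing_by exact pv_parent_dec _ _ _h

lemma anc_le {s : Nat} : ∀ pos, Anc s pos → s ≤ pos := by
  intro pos
  induction pos using Nat.strong_induction_on with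
  | _ pos ih =>
    intro h
    rw [Anc] at h
    split at h
    · omega
    · omega

lemma anc_self (s : Nat) : Anc s s := by
  rw [Anc]; simp

lemma anc_zero (pos : Nat) : Anc 0 pos := by
  induction pos using Nat.strong_induction_on with
  | _ pos ih =>
    rw [Anc]
    split
    · exact ih _ (by omega)
    · omega

lemma anc_parent {s pos : Nat} (h : Anc s pos) (hlt : s < pos) : Anc s ((pos - 1) / 2) := by
  rw [Anc] at h; rw [dif_pos hlt] at h; exact h

lemma anc_child {s pos c : Nat} (h : Anc s pos) (hc : c = 2*pos+1 ∨ c = 2*pos+2) : Anc s c := by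
  have hsle := anc_le _ h
  rw [Anc, dif_pos (by omega)]
  have : (c - 1) / 2 = pos := by omega
  rw [this]; exact h

def HeapAbove (a : List Int) (s : Nat) : Prop :=
  ∀ p c : Nat, s ≤ p → (c = 2*p+1 ∨ c = 2*p+2) → c < a.length → pvGet a p ≤ pvGet a c

-- heap-ordered except for pairs touching the current hole
def PairsOK (a : List Int) (s hole : Nat) : Prop :=
  ∀ p c : Nat, s ≤ p → p ≠ hole → (c = 2*p+1 ∨ c = 2*p+2) → c < a.length → c ≠ hole →
    pvGet a p ≤ pvGet a c

-- the hole's parent is ≤ the hole's children (lets a parent move down into the hole)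
def Bridge (a : List Int) (s hole : Nat) : Prop :=
  s < hole → ∀ c : Nat, (c = 2*hole+1 ∨ c = 2*hole+2) → c < a.length →
    pvGet a ((hole - 1) / 2) ≤ pvGet a c

lemma pvGet_eq_getElem (a : List Int) (i : Nat) (h : i < a.length) : pvGet a i = a[i] := by
  simp [pvGet, List.getD_eq_getElem?_getD, List.getElem?_eq_getElem h]

lemma pvGet_set_self (a : List Int) (i : Nat) (v : Int) (h : i < a.length) :
    pvGet (a.set i v) i = v := by
  simp [pvGet, List.getD_eq_getElem?_getD, h]

lemma pvGet_set_ne (a : List Int) (i j : Nat) (v : Int) (h : i ≠ j) :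
    pvGet (a.set i v) j = pvGet a j := by
  simp [pvGet, List.getD_eq_getElem?_getD, List.getElem?_set_ne h]

lemma set_perm (a : List Int) (i : Nat) (v : Int) (h : i < a.length) :
    (a.set i v).Perm (v :: a.eraseIdx i) := by
  rw [List.set_eq_take_append_cons_drop, if_pos h, List.eraseIdx_eq_take_drop_succ]
  exact List.perm_middle

lemma cons_eraseIdx_perm (a : List Int) (i : Nat) (h : i < a.length) :
    (pvGet a i :: a.eraseIdx i).Perm a := by
  have := set_perm a i (pvGet a i) h
  rw [pvGet_eq_getElem a i h] at this
  rw [List.set_getElem_self] at this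
  rw [pvGet_eq_getElem a i h]
  exact this.symm

lemma mem_pvGet (a : List Int) (i : Nat) (h : i < a.length) : pvGet a i ∈ a := by
  rw [pvGet_eq_getElem a i h]; exact List.getElem_mem h

-- permutation facts
lemma siftdownAux_perm (a : List Int) (s pos : Nat) (x : Int) (hpos : pos < a.length) :
    (siftdownAux a s pos x).Perm (x :: a.eraseIdx pos) := by
  fun_induction siftdownAux a s pos x with
  | case1 a pos h parentpos parent hlt ih =>
    have hppv : parentpos = (pos - 1) / 2 := rfl
    have hpp : parentpos < pos := by omega
    have key : ((a.set pos parent).eraseIdx parentpos).Perm (a.eraseIdx pos) := by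
      have e1 : pvGet (a.set pos parent) parentpos = parent :=
        pvGet_set_ne a pos parentpos parent (by omega)
      have p1 := cons_eraseIdx_perm (a.set pos parent) parentpos
        (by simp only [List.length_set]; omega)
      rw [e1] at p1
      have p2 := set_perm a pos parent hpos
      exact (List.perm_cons parent).mp (p1.trans p2)
    exact (ih (by simp only [List.length_set]; omega)).trans (key.cons x)
  | case2 a pos h parentpos parent hge => exact set_perm a pos x hpos
  | case3 a pos h => exact set_perm a pos x hpos

lemma siftupLoop_perm (a : List Int) (pos : Nat) (hpos : pos < a.length) :
    (pvGet a pos :: (siftupLoop a pos).1.eraseIdx (siftupLoop a pos).2).Perm a := by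
  fun_induction siftupLoop a pos with
  | case1 a pos h cp ih =>
    have hcpv : cp = if 2*pos+2 < a.length ∧ ¬ pvGet a (2*pos+1) < pvGet a (2*pos+2) then 2*pos+2 else 2*pos+1 := rfl
    have hcp : pos < cp ∧ cp < a.length := by
      rw [hcpv]; split_ifs <;> omega
    have e1 : pvGet (a.set pos (pvGet a cp)) cp = pvGet a cp :=
      pvGet_set_ne a pos cp _ (by omega)
    have ih' := ih (by simp only [List.length_set]; omega)
    rw [e1] at ih'
    have p2 := set_perm a pos (pvGet a cp) hpos
    have key := (List.perm_cons (pvGet a cp)).mp (ih'.trans p2)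
    exact (key.cons (pvGet a pos)).trans (cons_eraseIdx_perm a pos hpos)
  | case2 a pos hnl => exact cons_eraseIdx_perm a pos hpos

-- ordering facts
lemma siftupLoop_spec (a : List Int) (s pos : Nat) (hpos : pos < a.length) (hanc : Anc s pos)
    (h1 : PairsOK a s pos) (h2 : Bridge a s pos) :
    (siftupLoop a pos).2 < a.length ∧ Anc s (siftupLoop a pos).2 ∧
      a.length ≤ 2*(siftupLoop a pos).2 + 1 ∧
      PairsOK (siftupLoop a pos).1 s (siftupLoop a pos).2 ∧
      Bridge (siftupLoop a pos).1 s (siftupLoop a pos).2 := by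
  fun_induction siftupLoop a pos with
  | case1 a pos h cp ih =>
    have hcpv : cp = if 2*pos+2 < a.length ∧ ¬ pvGet a (2*pos+1) < pvGet a (2*pos+2) then 2*pos+2 else 2*pos+1 := rfl
    have hcp : pos < cp ∧ cp < a.length ∧ (cp = 2*pos+1 ∨ cp = 2*pos+2) := by
      rw [hcpv]; split_ifs <;> omega
    have hs : s ≤ pos := anc_le _ hanc
    -- the chosen child carries the smaller of the two children's values
    have hmin : ∀ c : Nat, (c = 2*pos+1 ∨ c = 2*pos+2) → c < a.length → pvGet a cp ≤ pvGet a c := by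
      intro c hc hclen
      rw [hcpv]; split_ifs with hif
      · rcases hc with hc | hc
        · subst hc; exact not_lt.mp hif.2
        · subst hc; exact le_refl _
      · rcases hc with hc | hc
        · subst hc; exact le_refl _
        · subst hc
          have : pvGet a (2*pos+1) < pvGet a (2*pos+2) := by
            by_contra hn
            exact hif ⟨hclen, hn⟩
          exact this.le
    have hlen : (a.set pos (pvGet a cp)).length = a.length := by simp
    have hanc' : Anc s cp := anc_child hanc hcp.2.2
    have hset_ne : ∀ j : Nat, j ≠ pos → pvGet (a.set pos (pvGet a cp)) j = pvGet a j :=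
      fun j hj => pvGet_set_ne a pos j _ (fun he => hj he.symm)
    have hset_pos : pvGet (a.set pos (pvGet a cp)) pos = pvGet a cp := pvGet_set_self a pos _ hpos
    have hpok : PairsOK (a.set pos (pvGet a cp)) s cp := by
      intro p c hsp hpne hc hclen hcne
      rw [hlen] at hclen
      by_cases hppos : p = pos
      · rw [hppos, hset_pos, hset_ne c (by omega)]
        exact hmin c (by omega) hclen
      · by_cases hcpos : c = pos
        · rw [hcpos, hset_ne p hppos, hset_pos]
          have hsp' : s < pos := by omega
          have hpe : p = (pos - 1) / 2 := by omega
          rw [hpe]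
          exact h2 hsp' cp hcp.2.2 hcp.2.1
        · rw [hset_ne p hppos, hset_ne c hcpos]
          exact h1 p c hsp hppos hc hclen hcpos
    have hbr : Bridge (a.set pos (pvGet a cp)) s cp := by
      intro hscp c hc hclen
      rw [hlen] at hclen
      have hparent : (cp - 1) / 2 = pos := by omega
      rw [hparent, hset_pos, hset_ne c (by omega)]
      exact h1 cp c (by omega) (by omega) hc hclen (by omega)
    obtain ⟨g1, g2, g3, g4, g5⟩ := ih (by rw [hlen]; exact hcp.2.1) hanc' hpok hbr
    rw [hlen] at g1 g3
    exact ⟨g1, g2, g3, g4, g5⟩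
  | case2 a pos h =>
    refine ⟨hpos, hanc, by omega, h1, h2⟩

lemma siftdownAux_spec (a : List Int) (s pos : Nat) (x : Int) (hpos : pos < a.length)
    (hanc : Anc s pos)
    (h1 : ∀ p c : Nat, s ≤ p → (c = 2*p+1 ∨ c = 2*p+2) → c < a.length → c ≠ pos →
      pvGet a p ≤ pvGet a c)
    (h2 : ∀ c : Nat, (c = 2*pos+1 ∨ c = 2*pos+2) → c < a.length → x ≤ pvGet a c)
    (h3 : Bridge a s pos) :
    HeapAbove (siftdownAux a s pos x) s := by
  fun_induction siftdownAux a s pos x with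
  | case1 a pos hps parentpos parent hlt ih =>
    have hppv : parentpos = (pos - 1) / 2 := rfl
    have hpv : parent = pvGet a parentpos := rfl
    have hpp : parentpos < pos := by omega
    have hlen : (a.set pos parent).length = a.length := by simp
    have hset_ne : ∀ j : Nat, j ≠ pos → pvGet (a.set pos parent) j = pvGet a j :=
      fun j hj => pvGet_set_ne a pos j _ (fun he => hj he.symm)
    have hset_pos : pvGet (a.set pos parent) pos = parent := pvGet_set_self a pos _ hpos
    have hancp : Anc s parentpos := hppv ▸ anc_parent hanc hps
    have hsp : s ≤ parentpos := anc_le _ hancp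
    apply ih (by omega) hancp
    · -- h1'
      intro p c hsple hc hclen hcne
      rw [hlen] at hclen
      by_cases hcpos : c = pos
      · have hpe : p = parentpos := by omega
        rw [hcpos, hset_pos, hpe, hset_ne parentpos (by omega), ← hpv]
      · by_cases hppos : p = pos
        · rw [hppos, hset_pos, hset_ne c hcpos]
          rw [hpv, hppv]
          exact h3 (by omega) c (by omega) hclen
        · rw [hset_ne p hppos, hset_ne c hcpos]
          exact h1 p c hsple hc hclen hcpos
    · -- h2'
      intro c hc hclen
      rw [hlen] at hclen
      by_cases hcpos : c = pos
      · rw [hcpos, hset_pos]; exact hlt.le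
      · rw [hset_ne c hcpos]
        have hple : parent ≤ pvGet a c := by
          rw [hpv]
          exact h1 parentpos c hsp (by omega) hclen hcpos
        exact hlt.le.trans hple
    · -- Bridge
      intro hspp c hc hclen
      rw [hlen] at hclen
      have hgp : (parentpos - 1) / 2 < parentpos := by omega
      have hancg : Anc s ((parentpos - 1) / 2) := anc_parent hancp hspp
      have hsg : s ≤ (parentpos - 1) / 2 := anc_le _ hancg
      have hgpar : pvGet a ((parentpos - 1) / 2) ≤ pvGet a parentpos :=
        h1 ((parentpos - 1) / 2) parentpos hsg (by omega) (by omega) (by omega)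
      rw [hset_ne ((parentpos - 1) / 2) (by omega)]
      by_cases hcpos : c = pos
      · rw [hcpos, hset_pos, hpv]
        exact hgpar
      · rw [hset_ne c hcpos]
        have : pvGet a parentpos ≤ pvGet a c :=
          h1 parentpos c hsp hc hclen hcpos
        exact hgpar.trans this
  | case2 a pos hps parentpos parent hge =>
    have hppv : parentpos = (pos - 1) / 2 := rfl
    have hpv : parent = pvGet a parentpos := rfl
    have hpp : parentpos < pos := by omega
    have hset_ne : ∀ j : Nat, j ≠ pos → pvGet (a.set pos x) j = pvGet a j :=
      fun j hj => pvGet_set_ne a pos j _ (fun he => hj he.symm)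
    have hset_pos : pvGet (a.set pos x) pos = x := pvGet_set_self a pos _ hpos
    intro p c hsple hc hclen
    rw [List.length_set] at hclen
    by_cases hcpos : c = pos
    · have hpe : p = parentpos := by omega
      rw [hcpos, hset_pos, hpe, hset_ne parentpos (by omega), ← hpv]
      exact not_lt.mp hge
    · by_cases hppos : p = pos
      · rw [hppos, hset_pos, hset_ne c hcpos]
        exact h2 c (by omega) hclen
      · rw [hset_ne p hppos, hset_ne c hcpos]
        exact h1 p c hsple hc hclen hcpos
  | case3 a pos hnps =>
    have hpse : pos = s := by
      have := anc_le _ hanc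
      omega
    have hset_ne : ∀ j : Nat, j ≠ pos → pvGet (a.set pos x) j = pvGet a j :=
      fun j hj => pvGet_set_ne a pos j _ (fun he => hj he.symm)
    have hset_pos : pvGet (a.set pos x) pos = x := pvGet_set_self a pos _ hpos
    intro p c hsple hc hclen
    rw [List.length_set] at hclen
    by_cases hppos : p = pos
    · rw [hppos, hset_pos, hset_ne c (by omega)]
      exact h2 c (by omega) hclen
    · have hcpos : c ≠ pos := by omega
      rw [hset_ne p hppos, hset_ne c hcpos]
      exact h1 p c hsple hc hclen hcpos

lemma siftup_spec (a : List Int) (pos : Nat) (hpos : pos < a.length)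
    (h1 : HeapAbove a (pos + 1)) :
    HeapAbove (siftup a pos) pos ∧ (siftup a pos).Perm a := by
  have hpok : PairsOK a pos pos := fun p c hsp hpne hc hclen hcne =>
    h1 p c (by omega) hc hclen
  have hbr : Bridge a pos pos := fun hlt => absurd hlt (lt_irrefl _)
  obtain ⟨g1, g2, g3, g4, g5⟩ := siftupLoop_spec a pos pos hpos (anc_self pos) hpok hbr
  have hlenU : (siftupLoop a pos).1.length = a.length := length_siftupLoop a pos
  constructor
  · show HeapAbove (siftdownAux (siftupLoop a pos).1 pos (siftupLoop a pos).2 (pvGet a pos)) pos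
    refine siftdownAux_spec (siftupLoop a pos).1 pos (siftupLoop a pos).2 (pvGet a pos)
      (by omega) g2 ?_ ?_ g5
    · intro p c hsp hc hclen hcne
      rw [hlenU] at hclen
      have hpne : p ≠ (siftupLoop a pos).2 := by omega
      exact g4 p c hsp hpne hc (by omega) hcne
    · intro c hc hclen
      rw [hlenU] at hclen
      exact absurd hclen (by omega)
  · show (siftdownAux (siftupLoop a pos).1 pos (siftupLoop a pos).2 (pvGet a pos)).Perm a
    have hperm1 := siftdownAux_perm (siftupLoop a pos).1 pos (siftupLoop a pos).2
      (pvGet a pos) (by omega)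
    exact hperm1.trans (siftupLoop_perm a pos hpos)

lemma fold_siftup_inv : ∀ (i : Nat) (a : List Int), 2*i ≤ a.length → HeapAbove a i →
    HeapAbove ((List.range i).reverse.foldl (fun h j => siftup h j) a) 0 ∧
      ((List.range i).reverse.foldl (fun h j => siftup h j) a).Perm a := by
  intro i
  induction i with
  | zero => intro a _ h; exact ⟨h, List.Perm.refl a⟩
  | succ i ih =>
    intro a hle h
    have hi : i < a.length := by omega
    obtain ⟨hset, hperm⟩ := siftup_spec a i hi h
    have hstep : (List.range (i+1)).reverse = i :: (List.range i).reverse := by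
      rw [List.range_succ, List.reverse_append]; simp
    rw [hstep]
    simp only [List.foldl_cons]
    have hlen : (siftup a i).length = a.length := length_siftup a i
    obtain ⟨r1, r2⟩ := ih (siftup a i) (by omega) hset
    exact ⟨r1, r2.trans hperm⟩

lemma pyHeapify_spec (a : List Int) :
    HeapAbove (pyHeapify a) 0 ∧ (pyHeapify a).Perm a := by
  unfold pyHeapify
  refine fold_siftup_inv (a.length / 2) a (by omega) ?_
  intro p c hp hc hclen
  exact absurd hclen (by omega)

lemma pvGet_append_left (a : List Int) (x : Int) (j : Nat) (h : j < a.length) :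
    pvGet (a ++ [x]) j = pvGet a j := by
  rw [pvGet_eq_getElem (a ++ [x]) j (by simp; omega), pvGet_eq_getElem a j h,
    List.getElem_append_left h]

lemma pvGet_append_last (a : List Int) (x : Int) :
    pvGet (a ++ [x]) a.length = x := by
  rw [pvGet_eq_getElem (a ++ [x]) a.length (by simp)]
  simp

lemma pyHeappush_spec (a : List Int) (x : Int) (hinv : HeapAbove a 0) :
    HeapAbove (pyHeappush a x) 0 ∧ (pyHeappush a x).Perm (a ++ [x]) := by
  have hlen : (a ++ [x]).length = a.length + 1 := by simp
  have hidx : (a ++ [x]).length - 1 = a.length := by omega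
  have hx : pvGet (a ++ [x]) ((a ++ [x]).length - 1) = x := by
    rw [hidx]; exact pvGet_append_last a x
  constructor
  · show HeapAbove (siftdownAux (a ++ [x]) 0 ((a ++ [x]).length - 1)
      (pvGet (a ++ [x]) ((a ++ [x]).length - 1))) 0
    rw [hx, hidx]
    refine siftdownAux_spec (a ++ [x]) 0 a.length x (by simp) (anc_zero a.length) ?_ ?_ ?_
    · intro p c hsp hc hclen hcne
      rw [hlen] at hclen
      have hc' : c < a.length := by omega
      have hp' : p < a.length := by omega
      rw [pvGet_append_left a x c hc', pvGet_append_left a x p hp']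
      exact hinv p c hsp hc hc'
    · intro c hc hclen
      rw [hlen] at hclen
      exact absurd hclen (by omega)
    · intro hlt c hc hclen
      rw [hlen] at hclen
      exact absurd hclen (by omega)
  · show (siftdownAux (a ++ [x]) 0 ((a ++ [x]).length - 1)
      (pvGet (a ++ [x]) ((a ++ [x]).length - 1))).Perm (a ++ [x])
    rw [hx, hidx]
    have hp := siftdownAux_perm (a ++ [x]) 0 a.length x (by simp)
    have he : (a ++ [x]).eraseIdx a.length = a := by
      rw [List.eraseIdx_eq_take_drop_succ]; simp
    rw [he] at hp
    refine hp.trans ?_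
    have hm := List.perm_middle (a := x) (l₁ := a) (l₂ := ([] : List Int))
    rw [List.append_nil] at hm
    exact hm.symm

lemma pvGet_dropLast (a : List Int) (j : Nat) (h : j < a.length - 1) :
    pvGet a.dropLast j = pvGet a j := by
  rw [pvGet_eq_getElem a.dropLast j (by simp [List.length_dropLast]; omega),
    pvGet_eq_getElem a j (by omega)]
  exact List.getElem_dropLast _

lemma pyHeappop_spec (a : List Int) (hinv : HeapAbove a 0) (hne : a ≠ []) :
    (pyHeappop a).1 = pvGet a 0 ∧ HeapAbove (pyHeappop a).2 0 ∧
      (pvGet a 0 :: (pyHeappop a).2).Perm a := by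
  have hlen : 1 ≤ a.length := List.length_pos_of_ne_nil hne
  have hrl : a.dropLast.length = a.length - 1 := List.length_dropLast
  have hsplit : a.dropLast ++ [a.getLastD 0] = a := by
    cases a with
    | nil => simp at hne
    | cons y ys =>
      simp only [List.getLastD_eq_getLast?]
      exact List.dropLast_append_getLast? ((y :: ys).getLast?.getD 0) rfl
  unfold pyHeappop
  split_ifs with hemp
  · -- a is a singleton
    rw [List.isEmpty_iff] at hemp
    have ha : a = [a.getLastD 0] := by rw [← hsplit, hemp]; simp
    have h0 : pvGet a 0 = a.getLastD 0 := by
      conv_lhs => rw [ha]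
      rfl
    refine ⟨h0.symm, ?_, ?_⟩
    · intro p c hp hc hclen
      rw [hemp] at hclen
      exact absurd hclen (by simp)
    · rw [hemp, h0]
      conv_rhs => rw [ha]
  · -- len ≥ 2
    rw [List.isEmpty_iff] at hemp
    have hr1 : 1 ≤ a.dropLast.length := List.length_pos_of_ne_nil hemp
    have hlen2 : 2 ≤ a.length := by omega
    set b := a.dropLast.set 0 (a.getLastD 0) with hb
    have hblen : b.length = a.length - 1 := by rw [hb, List.length_set, hrl]
    have hinvb : HeapAbove b 1 := by
      intro p c hp hc hclen
      have hc' : c < a.length - 1 := by omega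
      have hcb : pvGet b c = pvGet a c := by
        rw [hb, pvGet_set_ne _ 0 c _ (by omega), pvGet_dropLast a c (by omega)]
      have hpb : pvGet b p = pvGet a p := by
        rw [hb, pvGet_set_ne _ 0 p _ (by omega), pvGet_dropLast a p (by omega)]
      rw [hcb, hpb]
      exact hinv p c (by omega) hc (by omega)
    obtain ⟨hset, hperm⟩ := siftup_spec b 0 (by omega) (by
      intro p c hp hc hclen
      exact hinvb p c (by omega) hc hclen)
    refine ⟨?_, ?_, ?_⟩
    · show pvGet a.dropLast 0 = pvGet a 0
      exact pvGet_dropLast a 0 (by omega)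
    · intro p c hp hc hclen
      exact hset p c (by omega) hc hclen
    · show (pvGet a 0 :: siftup b 0).Perm a
      have hbp : b.Perm (a.getLastD 0 :: a.dropLast.eraseIdx 0) :=
        set_perm a.dropLast 0 (a.getLastD 0) (by omega)
      have hfirst : pvGet a.dropLast 0 = pvGet a 0 := pvGet_dropLast a 0 (by omega)
      have hdec : pvGet a.dropLast 0 :: a.dropLast.eraseIdx 0 = a.dropLast := by
        cases hdl : a.dropLast with
        | nil => exact absurd hdl hemp
        | cons r0 rt => simp [pvGet]
      -- pvGet a 0 :: last :: rest.eraseIdx 0  ~  a = rest ++ [last]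
      have s1 : (pvGet a 0 :: a.getLastD 0 :: a.dropLast.eraseIdx 0).Perm
          (a.getLastD 0 :: pvGet a 0 :: a.dropLast.eraseIdx 0) :=
        List.Perm.swap (a.getLastD 0) (pvGet a 0) _
      have s2 : a.getLastD 0 :: pvGet a 0 :: a.dropLast.eraseIdx 0
          = a.getLastD 0 :: a.dropLast := by rw [← hfirst, hdec]
      have s3 : (a.getLastD 0 :: a.dropLast).Perm (a.dropLast ++ [a.getLastD 0]) := by
        have hm := List.perm_middle (a := a.getLastD 0) (l₁ := a.dropLast)
          (l₂ := ([] : List Int))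
        rw [List.append_nil] at hm
        exact hm.symm
      have s4 : (pvGet a 0 :: a.getLastD 0 :: a.dropLast.eraseIdx 0).Perm a := by
        refine s1.trans ?_
        rw [s2]
        conv_rhs => rw [← hsplit]
        exact s3
      exact List.Perm.trans (List.Perm.cons _ (hperm.trans hbp)) s4

lemma root_min (a : List Int) (hinv : HeapAbove a 0) (j : Nat) (hj : j < a.length) :
    pvGet a 0 ≤ pvGet a j := by
  induction j using Nat.strong_induction_on with
  | _ j ih =>
    rcases Nat.eq_zero_or_pos j with hj0 | hj0
    · rw [hj0]
    · have hpar := hinv ((j-1)/2) j (by omega) (by omega) hj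
      exact (ih ((j-1)/2) (by omega) (by omega)).trans hpar

lemma min_of_perm_heap (heap foods : List Int) (hinv : HeapAbove heap 0)
    (hperm : heap.Perm foods) (hne : heap ≠ []) :
    PySem.List.min? foods (fun x => x) = some (pvGet heap 0) := by
  have hfne : foods ≠ [] := by
    intro he
    rw [he] at hperm
    exact hne hperm.eq_nil
  obtain ⟨m, hm⟩ : ∃ m, PySem.List.min? foods (fun x => x) = some m := by
    cases hmn : PySem.List.min? foods (fun x => x) with
    | none => exact absurd ((PySem.List.min?_eq_none_iff foods _).mp hmn) hfne
    | some m => exact ⟨m, rfl⟩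
  rw [hm]
  congr 1
  have hmemf : m ∈ foods := PySem.List.min?_mem hm
  have hmemh : m ∈ heap := (hperm.mem_iff).mpr hmemf
  have hroot : pvGet heap 0 ≤ m := by
    obtain ⟨j, hj, he⟩ := List.mem_iff_getElem.mp hmemh
    rw [← he, ← pvGet_eq_getElem heap j hj]
    exact root_min heap hinv j hj
  have h0mem : pvGet heap 0 ∈ foods :=
    hperm.mem_iff.mp (mem_pvGet heap 0 (List.length_pos_of_ne_nil hne))
  exact le_antisymm (PySem.List.min?_isMin hm (pvGet heap 0) h0mem) hroot

lemma loop_eq : ∀ (n : Nat) (heap foods : List Int) (K count : Int), heap.length = n →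
    HeapAbove heap 0 → heap.Perm foods → heap ≠ [] →
    solLoop heap K count = altLoop foods K count := by
  intro n
  induction n using Nat.strong_induction_on with
  | _ n ih =>
  intro heap foods K count hn hinv hperm hne
  have hlen := hperm.length_eq
  have hm := min_of_perm_heap heap foods hinv hperm hne
  have hlow : (PySem.List.min? foods (fun x => x)).getD 0 = pvGet heap 0 := by rw [hm]; rfl
  rw [solLoop, altLoop]
  by_cases hc : 2 ≤ heap.length ∧ pvGet heap 0 < K
  · rw [dif_pos hc, dif_pos (show 2 ≤ foods.length ∧
        (PySem.List.min? foods (fun x => x)).getD 0 < K from ⟨by omega, by rw [hlow]; exact hc.2⟩)]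
    -- A side: two pops and a push
    obtain ⟨e1, hinv1, hp1⟩ := pyHeappop_spec heap hinv hne
    have hlen1 : (pyHeappop heap).2.length = heap.length - 1 := length_pyHeappop heap
    have hne1 : (pyHeappop heap).2 ≠ [] := by
      intro he; rw [he] at hlen1; simp at hlen1; omega
    obtain ⟨e2, hinv2, hp2⟩ := pyHeappop_spec (pyHeappop heap).2 hinv1 hne1
    have hlen2 : (pyHeappop (pyHeappop heap).2).2.length = heap.length - 2 := by
      rw [length_pyHeappop, hlen1]; omega
    -- B side: two min/remove rounds
    have h0mem : pvGet heap 0 ∈ foods :=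
      hperm.mem_iff.mp (mem_pvGet heap 0 (by omega))
    have hf1 : (PySem.List.remove? foods (pvGet heap 0)).getD foods
        = foods.erase (pvGet heap 0) := by
      rw [PySem.List.remove?_eq_some_erase foods _ h0mem]; rfl
    have hperm1 : (pyHeappop heap).2.Perm (foods.erase (pvGet heap 0)) := by
      have h1 := (hp1.trans hperm).erase (pvGet heap 0)
      rw [List.erase_cons_head] at h1
      exact h1
    have hm2 := min_of_perm_heap (pyHeappop heap).2 (foods.erase (pvGet heap 0)) hinv1 hperm1 hne1
    have hlow2 : (PySem.List.min? (foods.erase (pvGet heap 0)) (fun x => x)).getD 0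
        = pvGet (pyHeappop heap).2 0 := by rw [hm2]; rfl
    have h1mem : pvGet (pyHeappop heap).2 0 ∈ foods.erase (pvGet heap 0) :=
      hperm1.mem_iff.mp (mem_pvGet (pyHeappop heap).2 0 (by omega))
    have hf2 : (PySem.List.remove? (foods.erase (pvGet heap 0))
          (pvGet (pyHeappop heap).2 0)).getD (foods.erase (pvGet heap 0))
        = (foods.erase (pvGet heap 0)).erase (pvGet (pyHeappop heap).2 0) := by
      rw [PySem.List.remove?_eq_some_erase _ _ h1mem]; rfl
    have hperm2 : (pyHeappop (pyHeappop heap).2).2.Perm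
        ((foods.erase (pvGet heap 0)).erase (pvGet (pyHeappop heap).2 0)) := by
      have h2 := (hp2.trans hperm1).erase (pvGet (pyHeappop heap).2 0)
      rw [List.erase_cons_head] at h2
      exact h2
    -- the pushed/appended value is the same
    have hval : new_scoville (pyHeappop (pyHeappop heap).2).1 (pyHeappop heap).1
        = pvGet (pyHeappop heap).2 0 * 2 + pvGet heap 0 := by
      rw [e1, e2, new_scoville]
    obtain ⟨hinv3, hp3⟩ := pyHeappush_spec (pyHeappop (pyHeappop heap).2).2
      (new_scoville (pyHeappop (pyHeappop heap).2).1 (pyHeappop heap).1) hinv2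
    have hperm3 : (pyHeappush (pyHeappop (pyHeappop heap).2).2
          (new_scoville (pyHeappop (pyHeappop heap).2).1 (pyHeappop heap).1)).Perm
        (((foods.erase (pvGet heap 0)).erase (pvGet (pyHeappop heap).2 0))
          ++ [pvGet (pyHeappop heap).2 0 * 2 + pvGet heap 0]) := by
      refine hp3.trans ?_
      rw [hval]
      exact hperm2.append_right _
    have hlen3 : (pyHeappush (pyHeappop (pyHeappop heap).2).2
          (new_scoville (pyHeappop (pyHeappop heap).2).1 (pyHeappop heap).1)).length
        = heap.length - 1 := by
      rw [length_pyHeappush, hlen2]; omega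
    have hne3 : (pyHeappush (pyHeappop (pyHeappop heap).2).2
          (new_scoville (pyHeappop (pyHeappop heap).2).1 (pyHeappop heap).1)) ≠ [] := by
      intro he; rw [he] at hlen3; simp at hlen3; omega
    simp only [hlow, hf1, hlow2, hf2]
    exact ih (heap.length - 1) (by omega) _ _ K (count + 1) hlen3 hinv3 hperm3 hne3
  · rw [dif_neg hc, dif_neg (show ¬(2 ≤ foods.length ∧
        (PySem.List.min? foods (fun x => x)).getD 0 < K) by rw [hlow]; omega)]
    by_cases h1 : heap.length ≤ 1
    · -- exactly one element left on both sides, with the same value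
      have hh1 : heap.length = 1 := by
        have := List.length_pos_of_ne_nil hne; omega
      obtain ⟨y, hy⟩ := List.length_eq_one_iff.mp hh1
      have hfy : foods = [y] := by
        rw [hy] at hperm
        exact List.perm_singleton.mp hperm.symm
      have hgy : pvGet heap 0 = y := by rw [hy]; rfl
      have hgfy : foods.getD 0 0 = y := by rw [hfy]; rfl
      by_cases hyk : y < K
      · rw [if_pos ⟨h1, by rw [hgy]; exact hyk⟩,
          if_pos ⟨by omega, by rw [hgfy]; exact hyk⟩]
      · rw [if_neg (fun hx => hyk (by rw [← hgy]; exact hx.2)),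
          if_neg (fun hx => hyk (by rw [← hgfy]; exact hx.2))]
    · rw [if_neg (by omega : ¬(heap.length ≤ 1 ∧ pvGet heap 0 < K)),
        if_neg (by omega : ¬(foods.length ≤ 1 ∧ foods.getD 0 0 < K))]

-- ===== VERDICT (by name: the statement is the Claim_ definition above) =====
theorem solution_spec : Claim_equal_solution := by
  intro scoville K _hdom hpre
  unfold Spec_solution solution solution_alt
  obtain ⟨hinv, hperm⟩ := pyHeapify_spec scoville
  have hne : pyHeapify scoville ≠ [] := by
    intro he
    apply hpre
    have hl := hperm.length_eq
    rw [he] at hl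
    exact List.length_eq_zero_iff.mp hl.symm
  exact loop_eq _ _ _ K 0 rfl hinv hperm hne
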